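-- pv_equiv track=rewrite | github.com/XuyingSwift/SwiftCodingSchool | AcePythonInterview/week1/candycrush.py | find_candies
-- ===== SOURCE A (Python) =====
-- def find_candies(matrix):
--     positions = set()
--     rows = len(matrix)
--     cols = len(matrix[0])
--
--     for i in range(rows):
--         for j in range(cols - 2):
--             if matrix[i][j] == 0:
--                 continue
--             if matrix[i][j] == matrix[i][j+1] == matrix[i][j+2]:
--                 positions.add((i, j))
--                 positions.add((i, j + 1))
--                 positions.add((i, j + 2))
--
--     for j in range(cols):
--         for i in range(rows -2):
--             if matrix[i][j] == 0:
--                 continue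
--             if matrix[i][j] == matrix[i+1][j] == matrix[i+2][j]:
--                 positions.add((i,j))
--                 positions.add((i+1, j))
--                 positions.add((i+2, j))
--
--     return positions
-- ===== SOURCE B (Python) =====
-- def _win(line, s, n):
--     # True when a triple of equal non-zero values starts at index s of the line.
--     return 0 <= s and s + 2 < n and line[s] != 0 and line[s] == line[s + 1] == line[s + 2]
--
--
-- def find_candies(matrix):
--     rows = len(matrix)
--     cols = len(matrix[0])
--     columns = [[row[j] for row in matrix] for j in range(cols)]
--     horiz = [(i, j)
--              for i, row in enumerate(matrix) for j in range(cols)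
--              if _win(row, j - 2, cols) or _win(row, j - 1, cols) or _win(row, j, cols)]
--     vert = [(i, j)
--             for j, col in enumerate(columns) for i in range(rows)
--             if _win(col, i - 2, rows) or _win(col, i - 1, rows) or _win(col, i, rows)]
--     return set(horiz + vert)
-- ===== Notes on version B (the rewrite author's own statement) =====
-- stated objective: alternative
-- what changed: A marks all three cells of each matching 3-window into a mutated set via two nested marking loops; B inverts the loops: it precomputes the column lists once and then tests each cell for being covered by some matching 3-window, building the result by comprehensions over cells.
-- outside the precondition, e.g. on find_candies([[1, 2], [3]]): A returns set(), B raises IndexError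
import Mathlib
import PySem

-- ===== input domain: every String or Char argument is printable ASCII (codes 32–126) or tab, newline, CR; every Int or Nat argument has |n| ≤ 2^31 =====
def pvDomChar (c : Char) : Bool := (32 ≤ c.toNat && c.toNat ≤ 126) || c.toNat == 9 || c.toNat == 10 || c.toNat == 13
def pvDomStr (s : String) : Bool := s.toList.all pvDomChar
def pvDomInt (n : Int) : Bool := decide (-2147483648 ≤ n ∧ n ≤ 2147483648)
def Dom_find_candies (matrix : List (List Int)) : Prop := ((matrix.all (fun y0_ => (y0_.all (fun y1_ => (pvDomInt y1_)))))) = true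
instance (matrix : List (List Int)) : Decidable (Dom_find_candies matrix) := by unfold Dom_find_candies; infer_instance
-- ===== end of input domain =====

-- B re-states the task per cell: a position is kept iff some 3-window of equal non-zero
-- candies covers it (comprehensions + one window test), instead of A's window loops that
-- mark three cells at a time into a growing set. Objective: alternative decomposition.

-- ===== PORT A =====
def find_candies (matrix : List (List Int)) : List (Int × Int) :=
  let rows : Int := matrix.length
  let cols : Int := (PySem.List.pyGetD matrix 0 []).length
  let s1 : PySem.Set (Int × Int) :=
    (PySem.List.pyRange 0 rows 1).foldl (fun s i =>
      (PySem.List.pyRange 0 (cols - 2) 1).foldl (fun s j =>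
        if PySem.List.pyGetD (PySem.List.pyGetD matrix i []) j 0 = 0 then s
        else if PySem.List.pyGetD (PySem.List.pyGetD matrix i []) j 0 =
                  PySem.List.pyGetD (PySem.List.pyGetD matrix i []) (j + 1) 0 ∧
                PySem.List.pyGetD (PySem.List.pyGetD matrix i []) (j + 1) 0 =
                  PySem.List.pyGetD (PySem.List.pyGetD matrix i []) (j + 2) 0 then
          PySem.Set.add (PySem.Set.add (PySem.Set.add s (i, j)) (i, j + 1)) (i, j + 2)
        else s) s) PySem.Set.empty
  let s2 : PySem.Set (Int × Int) :=
    (PySem.List.pyRange 0 cols 1).foldl (fun s j =>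
      (PySem.List.pyRange 0 (rows - 2) 1).foldl (fun s i =>
        if PySem.List.pyGetD (PySem.List.pyGetD matrix i []) j 0 = 0 then s
        else if PySem.List.pyGetD (PySem.List.pyGetD matrix i []) j 0 =
                  PySem.List.pyGetD (PySem.List.pyGetD matrix (i + 1) []) j 0 ∧
                PySem.List.pyGetD (PySem.List.pyGetD matrix (i + 1) []) j 0 =
                  PySem.List.pyGetD (PySem.List.pyGetD matrix (i + 2) []) j 0 then
          PySem.Set.add (PySem.Set.add (PySem.Set.add s (i, j)) (i + 1, j)) (i + 2, j)
        else s) s) s1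
  s2

-- ===== PORT B =====
-- helper _win of Source B (short-circuit 'and' = Bool &&: later conjuncts irrelevant when a guard is false)
def pvWin (line : List Int) (s : Int) (n : Int) : Bool :=
  decide (0 ≤ s) && decide (s + 2 < n) && decide (PySem.List.pyGetD line s 0 ≠ 0) &&
    decide (PySem.List.pyGetD line s 0 = PySem.List.pyGetD line (s + 1) 0) &&
    decide (PySem.List.pyGetD line (s + 1) 0 = PySem.List.pyGetD line (s + 2) 0)

def find_candies_alt (matrix : List (List Int)) : List (Int × Int) :=
  let rows : Int := matrix.length
  let cols : Int := (PySem.List.pyGetD matrix 0 []).length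
  let columns : List (List Int) :=
    (PySem.List.pyRange 0 cols 1).map (fun j => matrix.map (fun row => PySem.List.pyGetD row j 0))
  let horiz : List (Int × Int) :=
    (PySem.List.enumerate matrix).flatMap (fun p =>
      (((PySem.List.pyRange 0 cols 1).filter (fun j =>
          pvWin p.2 (j - 2) cols || pvWin p.2 (j - 1) cols || pvWin p.2 j cols)).map
        (fun j => (p.1, j))))
  let vert : List (Int × Int) :=
    (PySem.List.enumerate columns).flatMap (fun p =>
      (((PySem.List.pyRange 0 rows 1).filter (fun i =>
          pvWin p.2 (i - 2) rows || pvWin p.2 (i - 1) rows || pvWin p.2 i rows)).map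
        (fun i => (i, p.1))))
  PySem.Set.ofList (horiz ++ vert)

-- ===== PRECONDITION & SPEC =====
-- Pre_ excludes the empty matrix and matrices with a row shorter than the first row: there A
-- raises IndexError or silently scans only whichever cells exist, and B raises IndexError.
def Pre_find_candies (matrix : List (List Int)) : Prop :=
  matrix ≠ [] ∧ ∀ r ∈ matrix, matrix.headI.length ≤ r.length
instance (matrix : List (List Int)) : Decidable (Pre_find_candies matrix) := by
  unfold Pre_find_candies; infer_instance

def pvWitness_find_candies : List (List Int) := [[1, 1, 1], [0, 1, 2], [2, 1, 5]]

def Spec_find_candies (matrix : List (List Int)) (out : List (Int × Int)) : Prop := out = find_candies_alt matrix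
instance (matrix : List (List Int)) (out : List (Int × Int)) : Decidable (Spec_find_candies matrix out) := by unfold Spec_find_candies; infer_instance

-- ===== CLAIM (what is proved, stated in full; the proofs are below) =====
def Claim_equal_find_candies : Prop := ∀ (matrix : List (List Int)), Dom_find_candies matrix → Pre_find_candies matrix → Spec_find_candies matrix (find_candies matrix)

-- ===== LEMMAS AND PROOFS =====

-- window w (0-based) of the abstract line v of length n carries a non-zero triple
def pvGood (v : Nat → Int) (n w : Nat) : Bool :=
  decide (w + 2 < n) && decide (v w ≠ 0) && decide (v w = v (w + 1)) && decide (v (w + 1) = v (w + 2))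

-- cell j is covered by some good window with index < W
def pvMemUpto (v : Nat → Int) (n W j : Nat) : Bool :=
  (List.range W).any (fun w => decide (w ≤ j) && decide (j ≤ w + 2) && pvGood v n w)

-- the A-side window-marking step over abstract coordinates
def pvStep (v : Nat → Int) (pos : Nat → Int × Int) (s : PySem.Set (Int × Int)) (w : Nat) :
    PySem.Set (Int × Int) :=
  if v w = 0 then s
  else if v w = v (w + 1) ∧ v (w + 1) = v (w + 2) then
    PySem.Set.add (PySem.Set.add (PySem.Set.add s (pos w)) (pos (w + 1))) (pos (w + 2))
  else s

def pvLineList (v : Nat → Int) (n : Nat) (pos : Nat → Int × Int) : List (Int × Int) :=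
  ((List.range n).filter (pvMemUpto v n (n - 2))).map pos

lemma pvMemUpto_le (v : Nat → Int) (n W j : Nat) (h : pvMemUpto v n W j = true) : j ≤ W + 1 := by
  simp only [pvMemUpto, List.any_eq_true, List.mem_range, Bool.and_eq_true, decide_eq_true_eq] at h
  obtain ⟨w, hw, ⟨_, hj⟩, _⟩ := h
  omega

lemma pvMemUpto_succ_of_not_good (v : Nat → Int) (n W j : Nat) (hg : pvGood v n W = false) :
    pvMemUpto v n (W + 1) j = pvMemUpto v n W j := by
  simp [pvMemUpto, List.range_succ, hg]

lemma pvUpdate_append (s : PySem.Set (Int × Int)) (xs ys : List (Int × Int)) :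
    PySem.Set.update s (xs ++ ys) = PySem.Set.update (PySem.Set.update s xs) ys := by
  simp [PySem.Set.update, List.foldl_append]

lemma pvMemUpto_lt_eq (v : Nat → Int) (n W j : Nat) (hj : j < W) :
    pvMemUpto v n (W + 1) j = pvMemUpto v n W j := by
  have h : ¬ (W ≤ j) := by omega
  simp [pvMemUpto, List.range_succ, h]

lemma pvMemUpto_false_of_big (v : Nat → Int) (n W j : Nat) (hj : W + 1 < j) :
    pvMemUpto v n W j = false := by
  cases h : pvMemUpto v n W j with
  | false => rfl
  | true => exact absurd (pvMemUpto_le v n W j h) (by omega)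

lemma pvMemUpto_succ_m1m0 (v : Nat → Int) (n W : Nat)
    (h : pvMemUpto v n W (W + 1) = true) : pvMemUpto v n W W = true := by
  simp only [pvMemUpto, List.any_eq_true, List.mem_range, Bool.and_eq_true, decide_eq_true_eq] at h ⊢
  obtain ⟨w, hw, ⟨h1, h2⟩, hg⟩ := h
  exact ⟨w, hw, ⟨by omega, by omega⟩, hg⟩

lemma pvStep_update (v : Nat → Int) (n : Nat) (pos : Nat → Int × Int) (W : Nat) (hW : W + 2 < n)
    (s : PySem.Set (Int × Int)) :
    pvStep v pos (PySem.Set.update s (((List.range n).filter (pvMemUpto v n W)).map pos)) W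
      = PySem.Set.update s (((List.range n).filter (pvMemUpto v n (W + 1))).map pos) := by
  cases hg : pvGood v n W with
  | false =>
    have hfil : (List.range n).filter (pvMemUpto v n (W + 1))
        = (List.range n).filter (pvMemUpto v n W) :=
      List.filter_congr (fun a _ => pvMemUpto_succ_of_not_good v n W a hg)
    rw [hfil]
    simp only [pvGood, Bool.and_eq_false_iff, decide_eq_false_iff_not, not_not] at hg
    unfold pvStep
    split_ifs with h1 h2
    · rfl
    · rcases hg with ((hg | hg) | hg) | hg
      · omega
      · exact absurd hg h1
      · exact absurd h2.1 hg
      · exact absurd h2.2 hg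
    · rfl
  | true =>
    simp only [pvGood, Bool.and_eq_true, decide_eq_true_eq] at hg
    obtain ⟨⟨⟨_, h0⟩, h1⟩, h2⟩ := hg
    -- the three covered cells are members after the step
    have cov : ∀ j, W ≤ j → j ≤ W + 2 → pvMemUpto v n (W + 1) j = true := by
      intro j hj1 hj2
      simp only [pvMemUpto, List.any_eq_true, List.mem_range, Bool.and_eq_true, decide_eq_true_eq]
      refine ⟨W, by omega, ⟨hj1, hj2⟩, ?_⟩
      simp only [pvGood, Bool.and_eq_true, decide_eq_true_eq]
      exact ⟨⟨⟨hW, h0⟩, h1⟩, h2⟩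
    -- split range n at W and at W+3
    have hn : n = (W + 3) + (n - (W + 3)) := by omega
    have hsplit : ∀ (b : Nat → Bool), (∀ j, b j = true → j ≤ W + 2) →
        (List.range n).filter b
          = ((List.range W).filter b) ++ ([W, W + 1, W + 2].filter b) := by
      intro b hb
      conv_lhs => rw [hn, List.range_add]
      rw [List.filter_append]
      have htail : ((List.range (n - (W + 3))).map (W + 3 + ·)).filter b = [] := by
        refine List.filter_eq_nil_iff.mpr ?_
        intro a ha
        simp only [List.mem_map, List.mem_range] at ha
        obtain ⟨x, _, rfl⟩ := ha
        intro hcontra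
        exact absurd (hb _ hcontra) (by omega)
      rw [htail, List.append_nil]
      have : W + 3 = W + 1 + 1 + 1 := by omega
      rw [this, List.range_succ, List.range_succ, List.range_succ]
      simp [List.filter_append]
    have hq := hsplit (pvMemUpto v n (W + 1))
      (fun j h => pvMemUpto_le v n (W + 1) j h)
    have hp := hsplit (pvMemUpto v n W) (fun j h => by have := pvMemUpto_le v n W j h; omega)
    have hpre : (List.range W).filter (pvMemUpto v n (W + 1))
        = (List.range W).filter (pvMemUpto v n W) :=
      List.filter_congr (fun a ha => pvMemUpto_lt_eq v n W a (List.mem_range.mp ha))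
    have hp2 : pvMemUpto v n W (W + 2) = false := pvMemUpto_false_of_big v n W (W + 2) (by omega)
    -- step reduces to three adds
    have hstep : ∀ t : PySem.Set (Int × Int), pvStep v pos t W
        = PySem.Set.add (PySem.Set.add (PySem.Set.add t (pos W)) (pos (W + 1))) (pos (W + 2)) := by
      intro t; unfold pvStep; rw [if_neg h0, if_pos ⟨h1, h2⟩]
    have hqmid : (List.filter (pvMemUpto v n (W + 1)) [W, W + 1, W + 2]) = [W, W + 1, W + 2] := by
      simp [cov W (by omega) (by omega), cov (W + 1) (by omega) (by omega),
        cov (W + 2) (by omega) (by omega)]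
    rw [hstep, hq, hp, hpre, hqmid]
    rw [List.map_append, List.map_append, pvUpdate_append, pvUpdate_append]
    have habs : ∀ (t : PySem.Set (Int × Int)) (x : Int × Int), x ∈ t → PySem.Set.add t x = t :=
      fun t x hx => PySem.Set.add_of_mem hx
    cases hm0 : pvMemUpto v n W W with
    | false =>
      cases hm1 : pvMemUpto v n W (W + 1) with
      | true => exact absurd (pvMemUpto_succ_m1m0 v n W hm1) (by simp [hm0])
      | false =>
        have hpmid : List.filter (pvMemUpto v n W) [W, W + 1, W + 2] = [] := by
          simp [hm0, hm1, hp2]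
        rw [hpmid]
        rfl
    | true =>
      cases hm1 : pvMemUpto v n W (W + 1) with
      | false =>
        have hpmid : List.filter (pvMemUpto v n W) [W, W + 1, W + 2] = [W] := by
          simp [hm0, hm1, hp2]
        rw [hpmid]
        show ((((PySem.Set.update _ _).add (pos W)).add (pos W)).add (pos (W + 1))).add (pos (W + 2))
          = _
        rw [habs _ (pos W) ((PySem.Set.mem_add _ _ _).mpr (Or.inr rfl))]
        rfl
      | true =>
        have hpmid : List.filter (pvMemUpto v n W) [W, W + 1, W + 2] = [W, W + 1] := by
          simp [hm0, hm1, hp2]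
        rw [hpmid]
        show (((((PySem.Set.update _ _).add (pos W)).add (pos (W + 1))).add (pos W)).add
            (pos (W + 1))).add (pos (W + 2)) = _
        rw [habs _ (pos W) ((PySem.Set.mem_add _ _ _).mpr (Or.inl ((PySem.Set.mem_add _ _ _).mpr (Or.inr rfl)))), habs _ (pos (W + 1)) ((PySem.Set.mem_add _ _ _).mpr (Or.inr rfl))]
        rfl


lemma pvLineFold_aux (v : Nat → Int) (n : Nat) (pos : Nat → Int × Int) :
    ∀ (k W : Nat), W + k = n - 2 → ∀ s : PySem.Set (Int × Int),
      (List.range' W k).foldl (pvStep v pos)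
        (PySem.Set.update s (((List.range n).filter (pvMemUpto v n W)).map pos))
      = PySem.Set.update s (((List.range n).filter (pvMemUpto v n (n - 2))).map pos) := by
  intro k
  induction k with
  | zero =>
    intro W hW s
    have : W = n - 2 := by omega
    subst this
    simp [List.range']
  | succ k ih =>
    intro W hW s
    rw [List.range'_succ, List.foldl_cons, pvStep_update v n pos W (by omega) s]
    exact ih (W + 1) (by omega) s

lemma pvLineFold (v : Nat → Int) (n : Nat) (pos : Nat → Int × Int) (s : PySem.Set (Int × Int)) :
    (List.range (n - 2)).foldl (pvStep v pos) s = PySem.Set.update s (pvLineList v n pos) := by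
  have hf : (List.range n).filter (pvMemUpto v n 0) = [] :=
    List.filter_eq_nil_iff.mpr (fun a _ => by simp [pvMemUpto])
  have h0 : PySem.Set.update s (((List.range n).filter (pvMemUpto v n 0)).map pos) = s := by
    simp [hf, PySem.Set.update]
  rw [pvLineList, ← pvLineFold_aux v n pos (n - 2) 0 (by omega) s, h0, List.range_eq_range']

-- B's per-cell window test equals coverage by a good window
lemma pvAny_eq_memUpto (line : List Int) (n j : Nat) :
    ([(j : Int) - 2, (j : Int) - 1, (j : Int)].any
        (fun s => pvWin line s (n : Int)))
      = pvMemUpto (fun k => line.getD k 0) n (n - 2) j := by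
  rw [Bool.eq_iff_iff]
  simp only [List.any_eq_true, List.mem_cons, List.not_mem_nil, or_false,
    pvWin, pvMemUpto, pvGood, List.mem_range, Bool.and_eq_true, decide_eq_true_eq]
  constructor
  · rintro ⟨s, hs, ⟨⟨⟨⟨h0, h2n⟩, hnz⟩, he1⟩, he2⟩⟩
    lift s to Nat using h0 with w
    have hw2 : w + 2 < n := by exact_mod_cast h2n
    simp only [show ((w : Int) + 1) = ((w + 1 : Nat) : Int) by omega,
      show ((w : Int) + 2) = ((w + 2 : Nat) : Int) by omega,
      PySem.List.pyGetD_natCast] at hnz he1 he2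
    exact ⟨w, by omega, ⟨by omega, by omega⟩, ⟨⟨⟨hw2, hnz⟩, he1⟩, he2⟩⟩
  · rintro ⟨w, hw, ⟨hwj, hjw⟩, ⟨⟨⟨hw2, hnz⟩, he1⟩, he2⟩⟩
    refine ⟨(w : Int), by omega, ?_⟩
    simp only [show ((w : Int) + 1) = ((w + 1 : Nat) : Int) by omega,
      show ((w : Int) + 2) = ((w + 2 : Nat) : Int) by omega,
      PySem.List.pyGetD_natCast]
    exact ⟨⟨⟨⟨by omega, by exact_mod_cast hw2⟩, hnz⟩, he1⟩, he2⟩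


lemma pvOr_eq_memUpto (line : List Int) (n j : Nat) :
    (pvWin line ((j : Int) - 2) (n : Int) || pvWin line ((j : Int) - 1) (n : Int) ||
        pvWin line (j : Int) (n : Int))
      = pvMemUpto (fun k => line.getD k 0) n (n - 2) j := by
  rw [← pvAny_eq_memUpto]
  simp [Bool.or_assoc]

lemma pvEnumFlat (xs : List (List Int)) (g : Int × List Int → List (Int × Int)) :
    (PySem.List.enumerate xs).flatMap g
      = List.flatMap (fun k : Nat => g ((k : Int), xs.getD k [])) (List.range xs.length) := by
  rw [PySem.List.enumerate_eq_map_pyRange xs ([] : List Int), PySem.List.len_eq,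
    show PySem.List.pyRange 0 (xs.length : Int) 1
        = List.map (fun k : Nat => (k : Int)) (List.range xs.length) by
      rw [PySem.List.pyRange_one]; simp only [zero_add, sub_zero, Int.toNat_natCast],
    List.map_map, List.flatMap_map]
  simp only [Function.comp, PySem.List.pyGetD_natCast]

lemma pvLineComp (m : Nat) (line : List Int) (pos : Nat → Int × Int)
    (pos' : Int → Int × Int) (hpos : ∀ k : Nat, pos' (k : Int) = pos k) :
    ((PySem.List.pyRange 0 (m : Int) 1).filter (fun t =>
        pvWin line (t - 2) (m : Int) || pvWin line (t - 1) (m : Int) || pvWin line t (m : Int))).map pos'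
      = pvLineList (fun k => line.getD k 0) m pos := by
  rw [show PySem.List.pyRange 0 (m : Int) 1
        = List.map (fun k : Nat => (k : Int)) (List.range m) by
      rw [PySem.List.pyRange_one]; simp only [zero_add, sub_zero, Int.toNat_natCast],
    List.filter_map, List.map_map]
  have hc : ((fun t => pvWin line (t - 2) (m : Int) || pvWin line (t - 1) (m : Int) ||
        pvWin line t (m : Int)) ∘ (fun k : Nat => (k : Int)))
      = pvMemUpto (fun k => line.getD k 0) m (m - 2) := by
    funext k
    exact pvOr_eq_memUpto line m k
  rw [hc, pvLineList]
  exact List.map_congr_left (fun a _ => hpos a)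

lemma pvFoldl_update_flatMap {β : Type} (l : List β) (L : β → List (Int × Int))
    (s : PySem.Set (Int × Int)) :
    l.foldl (fun s i => PySem.Set.update s (L i)) s = PySem.Set.update s (l.flatMap L) := by
  induction l generalizing s with
  | nil => simp [PySem.Set.update]
  | cons a l ih => simp [List.flatMap_cons, pvUpdate_append, ih]


def pvRowList (matrix : List (List Int)) (i : Nat) : List (Int × Int) :=
  pvLineList (fun k => (matrix.getD i []).getD k 0) (matrix.getD 0 []).length
    (fun k => ((i : Int), (k : Int)))

lemma pvRowFold (matrix : List (List Int)) (i : Nat) (s : PySem.Set (Int × Int)) :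
    (PySem.List.pyRange 0 (((PySem.List.pyGetD matrix 0 []).length : Int) - 2) 1).foldl
      (fun s j =>
        if PySem.List.pyGetD (PySem.List.pyGetD matrix (i : Int) []) j 0 = 0 then s
        else if PySem.List.pyGetD (PySem.List.pyGetD matrix (i : Int) []) j 0 =
                  PySem.List.pyGetD (PySem.List.pyGetD matrix (i : Int) []) (j + 1) 0 ∧
                PySem.List.pyGetD (PySem.List.pyGetD matrix (i : Int) []) (j + 1) 0 =
                  PySem.List.pyGetD (PySem.List.pyGetD matrix (i : Int) []) (j + 2) 0 then
          PySem.Set.add (PySem.Set.add (PySem.Set.add s ((i : Int), j)) ((i : Int), j + 1)) ((i : Int), j + 2)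
        else s) s
    = PySem.Set.update s (pvRowList matrix i) := by
  simp only [PySem.List.pyGetD_zero]
  rw [PySem.List.pyRange_one]
  have ht : ((((matrix.getD 0 []).length : Int)) - 2 - 0).toNat
      = (matrix.getD 0 []).length - 2 := by omega
  rw [ht, List.foldl_map]
  have hline : PySem.List.pyGetD matrix (i : Int) [] = matrix.getD i [] :=
    PySem.List.pyGetD_natCast matrix i []
  have hfun : (fun (x : PySem.Set (Int × Int)) (y : Nat) =>
      if PySem.List.pyGetD (PySem.List.pyGetD matrix (i : Int) []) (0 + (y : Int)) 0 = 0 then x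
      else if PySem.List.pyGetD (PySem.List.pyGetD matrix (i : Int) []) (0 + (y : Int)) 0 =
                PySem.List.pyGetD (PySem.List.pyGetD matrix (i : Int) []) (0 + (y : Int) + 1) 0 ∧
              PySem.List.pyGetD (PySem.List.pyGetD matrix (i : Int) []) (0 + (y : Int) + 1) 0 =
                PySem.List.pyGetD (PySem.List.pyGetD matrix (i : Int) []) (0 + (y : Int) + 2) 0 then
        PySem.Set.add (PySem.Set.add (PySem.Set.add x ((i : Int), 0 + (y : Int))) ((i : Int), 0 + (y : Int) + 1)) ((i : Int), 0 + (y : Int) + 2)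
      else x)
      = pvStep (fun k => (matrix.getD i []).getD k 0) (fun k => ((i : Int), (k : Int))) := by
    funext x y
    simp only [zero_add, hline, pvStep,
      show ((y : Int) + 1) = ((y + 1 : Nat) : Int) by omega,
      show ((y : Int) + 2) = ((y + 2 : Nat) : Int) by omega,
      PySem.List.pyGetD_natCast]
  rw [hfun, pvLineFold]
  rfl

def pvColList (matrix : List (List Int)) (j : Nat) : List (Int × Int) :=
  pvLineList (fun k => (matrix.getD k []).getD j 0) matrix.length
    (fun k => ((k : Int), (j : Int)))

lemma pvColFold (matrix : List (List Int)) (j : Nat) (s : PySem.Set (Int × Int)) :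
    (PySem.List.pyRange 0 ((matrix.length : Int) - 2) 1).foldl
      (fun s i =>
        if PySem.List.pyGetD (PySem.List.pyGetD matrix i []) (j : Int) 0 = 0 then s
        else if PySem.List.pyGetD (PySem.List.pyGetD matrix i []) (j : Int) 0 =
                  PySem.List.pyGetD (PySem.List.pyGetD matrix (i + 1) []) (j : Int) 0 ∧
                PySem.List.pyGetD (PySem.List.pyGetD matrix (i + 1) []) (j : Int) 0 =
                  PySem.List.pyGetD (PySem.List.pyGetD matrix (i + 2) []) (j : Int) 0 then
          PySem.Set.add (PySem.Set.add (PySem.Set.add s (i, (j : Int))) (i + 1, (j : Int))) (i + 2, (j : Int))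
        else s) s
    = PySem.Set.update s (pvColList matrix j) := by
  rw [PySem.List.pyRange_one]
  have ht : (((matrix.length : Int)) - 2 - 0).toNat = matrix.length - 2 := by omega
  rw [ht, List.foldl_map]
  have hfun : (fun (x : PySem.Set (Int × Int)) (y : Nat) =>
      if PySem.List.pyGetD (PySem.List.pyGetD matrix (0 + (y : Int)) []) (j : Int) 0 = 0 then x
      else if PySem.List.pyGetD (PySem.List.pyGetD matrix (0 + (y : Int)) []) (j : Int) 0 =
                PySem.List.pyGetD (PySem.List.pyGetD matrix (0 + (y : Int) + 1) []) (j : Int) 0 ∧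
              PySem.List.pyGetD (PySem.List.pyGetD matrix (0 + (y : Int) + 1) []) (j : Int) 0 =
                PySem.List.pyGetD (PySem.List.pyGetD matrix (0 + (y : Int) + 2) []) (j : Int) 0 then
        PySem.Set.add (PySem.Set.add (PySem.Set.add x (0 + (y : Int), (j : Int))) (0 + (y : Int) + 1, (j : Int))) (0 + (y : Int) + 2, (j : Int))
      else x)
      = pvStep (fun k => (matrix.getD k []).getD j 0) (fun k => ((k : Int), (j : Int))) := by
    funext x y
    simp only [zero_add, pvStep,
      show ((y : Int) + 1) = ((y + 1 : Nat) : Int) by omega,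
      show ((y : Int) + 2) = ((y + 2 : Nat) : Int) by omega,
      PySem.List.pyGetD_natCast]
  rw [hfun, pvLineFold]
  rfl

lemma pvA_eq (matrix : List (List Int)) :
    find_candies matrix
      = PySem.Set.update
          (PySem.Set.update PySem.Set.empty
            ((List.range matrix.length).flatMap (pvRowList matrix)))
          ((List.range (matrix.getD 0 []).length).flatMap (pvColList matrix)) := by
  unfold find_candies
  dsimp only
  rw [show PySem.List.pyRange 0 (matrix.length : Int) 1
        = List.map (fun k : Nat => (k : Int)) (List.range matrix.length) by
      rw [PySem.List.pyRange_one]; simp only [zero_add, sub_zero, Int.toNat_natCast],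
    show PySem.List.pyRange 0 (((PySem.List.pyGetD matrix 0 []).length : Int)) 1
        = List.map (fun k : Nat => (k : Int)) (List.range (PySem.List.pyGetD matrix 0 []).length) by
      rw [PySem.List.pyRange_one]; simp only [zero_add, sub_zero, Int.toNat_natCast]]
  rw [List.foldl_map, List.foldl_map]
  simp only [pvRowFold, pvColFold]
  rw [pvFoldl_update_flatMap, pvFoldl_update_flatMap]
  simp [PySem.List.pyGetD_zero]


lemma pvB_eq (matrix : List (List Int)) :
    find_candies_alt matrix
      = PySem.Set.update
          (PySem.Set.update PySem.Set.empty
            ((List.range matrix.length).flatMap (pvRowList matrix)))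
          ((List.range (matrix.getD 0 []).length).flatMap (pvColList matrix)) := by
  unfold find_candies_alt
  dsimp only
  rw [pvEnumFlat matrix, pvEnumFlat]
  simp only [PySem.List.pyGetD_zero]
  -- horizontal part
  have hH : (List.range matrix.length).flatMap (fun k =>
      ((PySem.List.pyRange 0 (((matrix.getD 0 []).length : Int)) 1).filter (fun j =>
          pvWin (matrix.getD k []) (j - 2) (((matrix.getD 0 []).length : Int)) ||
          pvWin (matrix.getD k []) (j - 1) (((matrix.getD 0 []).length : Int)) ||
          pvWin (matrix.getD k []) j (((matrix.getD 0 []).length : Int)))).map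
        (fun j => ((k : Int), j)))
      = (List.range matrix.length).flatMap (pvRowList matrix) := by
    rw [List.flatMap_def, List.flatMap_def]
    refine congrArg List.flatten (List.map_congr_left ?_)
    intro i _
    rw [pvLineComp ((matrix.getD 0 []).length) (matrix.getD i [])
      (fun k => ((i : Int), (k : Int))) (fun j => ((i : Int), j)) (fun k => rfl)]
    rw [pvRowList]
  -- the columns list
  have hlenC : ((PySem.List.pyRange 0 (((matrix.getD 0 []).length : Int)) 1).map
      (fun j => matrix.map (fun row => PySem.List.pyGetD row j 0))).length
      = (matrix.getD 0 []).length := by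
    simp [PySem.List.length_pyRange_one]
  have hcolsget : ∀ j : Nat, j < (matrix.getD 0 []).length →
      ((PySem.List.pyRange 0 (((matrix.getD 0 []).length : Int)) 1).map
        (fun j => matrix.map (fun row => PySem.List.pyGetD row j 0))).getD j []
      = matrix.map (fun row => PySem.List.pyGetD row (j : Int) 0) := by
    intro j hj
    rw [List.getD_eq_getElem _ _ (by rw [hlenC]; exact hj), List.getElem_map,
      PySem.List.getElem_pyRange_one]
    simp
  have hline : ∀ j : Nat,
      (fun k => (matrix.map (fun row => PySem.List.pyGetD row (j : Int) 0)).getD k 0)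
        = fun k => (matrix.getD k []).getD j 0 := by
    intro j
    funext k
    rcases Nat.lt_or_ge k matrix.length with hk | hk
    · rw [List.getD_eq_getElem _ _ (by simpa using hk), List.getElem_map,
        PySem.List.pyGetD_natCast, List.getD_eq_getElem _ _ hk]
    · rw [List.getD_eq_default _ _ (by simpa using hk), List.getD_eq_default _ _ hk]
      simp [List.getD]
  -- vertical part
  have hV : (List.range ((PySem.List.pyRange 0 (((matrix.getD 0 []).length : Int)) 1).map
        (fun j => matrix.map (fun row => PySem.List.pyGetD row j 0))).length).flatMap (fun k =>
      ((PySem.List.pyRange 0 ((matrix.length : Int)) 1).filter (fun i =>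
          pvWin (((PySem.List.pyRange 0 (((matrix.getD 0 []).length : Int)) 1).map
              (fun j => matrix.map (fun row => PySem.List.pyGetD row j 0))).getD k [])
            (i - 2) ((matrix.length : Int)) ||
          pvWin (((PySem.List.pyRange 0 (((matrix.getD 0 []).length : Int)) 1).map
              (fun j => matrix.map (fun row => PySem.List.pyGetD row j 0))).getD k [])
            (i - 1) ((matrix.length : Int)) ||
          pvWin (((PySem.List.pyRange 0 (((matrix.getD 0 []).length : Int)) 1).map
              (fun j => matrix.map (fun row => PySem.List.pyGetD row j 0))).getD k [])
            i ((matrix.length : Int)))).map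
        (fun i => (i, (k : Int))))
      = (List.range (matrix.getD 0 []).length).flatMap (pvColList matrix) := by
    rw [hlenC, List.flatMap_def, List.flatMap_def]
    refine congrArg List.flatten (List.map_congr_left ?_)
    intro j hj
    rw [hcolsget j (List.mem_range.mp hj)]
    rw [pvLineComp matrix.length (matrix.map (fun row => PySem.List.pyGetD row (j : Int) 0))
      (fun k => ((k : Int), (j : Int))) (fun i => (i, (j : Int))) (fun k => rfl)]
    rw [pvColList, hline j]
  rw [hH, hV]
  simp [PySem.Set.ofList_eq_foldl, PySem.Set.update, List.foldl_append, PySem.Set.empty]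

-- ===== VERDICT (by name: the statement is the Claim_ definition above) =====
theorem find_candies_spec : Claim_equal_find_candies := by
  intro matrix _ _
  unfold Spec_find_candies
  rw [pvA_eq, pvB_eq]
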